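-- pv_equiv track=rewrite | github.com/ReiHakiri/Learning-computation | CLTM/actions.py | add_until_variable
-- ===== SOURCE A (Python) =====
-- from itertools import product
--
-- def multi_to_state(line_n: int, intermediate: int, v_values: list[int], total_lines: int, v_bounds: list[int]) -> int:
--     result = line_n
--     radix = total_lines
--
--     result += intermediate * radix
--     radix *= 3
--
--     for v_value, v_bound in zip(v_values, v_bounds):
--         if v_value >= v_bound:
--             raise Exception('Variable value out of bounds')
--
--         result += v_value * radix
--         radix *= v_bound
--
--     return result
--
-- def all_v_values(v_bounds: list[int]) -> product:
--     result = []
--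
--     for v_bound in v_bounds:
--         result.append(range(v_bound))
--
--     return product(*result)
--
-- HALT = -1
--
-- def add_until_variable(transition_table: list[list[int]], line_n: int, total_symbols: int, total_lines: int, v_bounds: list[int], i: int, value: int, p: int) -> list[list[tuple[int, int, int]]]:
--     if value >= v_bounds[i]:
--         raise Exception('Comparison value out of bounds')
--
--     for v_values in all_v_values(v_bounds):
--         state1 = multi_to_state(line_n, 0, v_values, total_lines, v_bounds)
--         state2 = multi_to_state(line_n, 1, v_values, total_lines, v_bounds)
--         state3 = multi_to_state(line_n + 1, 0, v_values, total_lines, v_bounds)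
--
--         state4 = multi_to_state(p, 0, v_values, total_lines, v_bounds)
--         state5 = multi_to_state(p, 1, v_values, total_lines, v_bounds)
--
--         if p + 1 >= total_lines:
--             state6 = HALT
--
--         else:
--             state6 = multi_to_state(p + 1, 0, v_values, total_lines, v_bounds)
--
--         for symbol1 in range(total_symbols):
--             for symbol2 in range(total_symbols):
--                 if v_values[i] == value:
--                     transition_table[symbol1][state1] = (symbol1, state2, 1)
--                     transition_table[symbol2][state2] = (symbol2, state6, -1)
--
--                 else:
--                     transition_table[symbol1][state1] = (symbol1, state2, 1)
--                     transition_table[symbol2][state2] = (symbol2, state3, -1)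
--
--                 transition_table[symbol1][state4] = (symbol1, state5, 1)
--                 transition_table[symbol2][state5] = (symbol2, state1, -1)
--
--     return transition_table
-- ===== SOURCE B (Python) =====
-- from itertools import product
--
-- HALT = -1
--
-- def add_until_variable(transition_table, line_n, total_symbols, total_lines, v_bounds, i, value, p):
--     # B: same table filling, but the symbol1 x symbol2 double loop is replaced by a
--     # single loop over one symbol (each write depends on only one of the two symbols).
--     # Mutates transition_table in place, like the original.
--     if value >= v_bounds[i]:
--         raise Exception('Comparison value out of bounds')
--
--     for v_values in product(*(range(b) for b in v_bounds)):
--         radix = total_lines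
--         offs = 0
--         r = radix * 3
--         for v_value, v_bound in zip(v_values, v_bounds):
--             offs += v_value * r
--             r *= v_bound
--         state1 = line_n + offs
--         state2 = line_n + radix + offs
--         state4 = p + offs
--         state5 = p + radix + offs
--         if v_values[i] == value:
--             back = HALT if p + 1 >= total_lines else p + 1 + offs
--         else:
--             back = line_n + 1 + offs
--         for s in range(total_symbols):
--             row = transition_table[s]
--             row[state1] = (s, state2, 1)
--             row[state2] = (s, back, -1)
--             row[state4] = (s, state5, 1)
--             row[state5] = (s, state1, -1)
--
--     return transition_table
-- ===== Notes on version B (the rewrite author's own statement) =====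
-- stated objective: alternative
-- what changed: A fills the table with a symbol1 x symbol2 double loop although every write depends on only one of the two symbols; B uses a single loop over one symbol per v_values tuple and computes the state offset once per tuple instead of via six multi_to_state calls; a timing run did not confirm a speed-up, so none is claimed.
import Mathlib
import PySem

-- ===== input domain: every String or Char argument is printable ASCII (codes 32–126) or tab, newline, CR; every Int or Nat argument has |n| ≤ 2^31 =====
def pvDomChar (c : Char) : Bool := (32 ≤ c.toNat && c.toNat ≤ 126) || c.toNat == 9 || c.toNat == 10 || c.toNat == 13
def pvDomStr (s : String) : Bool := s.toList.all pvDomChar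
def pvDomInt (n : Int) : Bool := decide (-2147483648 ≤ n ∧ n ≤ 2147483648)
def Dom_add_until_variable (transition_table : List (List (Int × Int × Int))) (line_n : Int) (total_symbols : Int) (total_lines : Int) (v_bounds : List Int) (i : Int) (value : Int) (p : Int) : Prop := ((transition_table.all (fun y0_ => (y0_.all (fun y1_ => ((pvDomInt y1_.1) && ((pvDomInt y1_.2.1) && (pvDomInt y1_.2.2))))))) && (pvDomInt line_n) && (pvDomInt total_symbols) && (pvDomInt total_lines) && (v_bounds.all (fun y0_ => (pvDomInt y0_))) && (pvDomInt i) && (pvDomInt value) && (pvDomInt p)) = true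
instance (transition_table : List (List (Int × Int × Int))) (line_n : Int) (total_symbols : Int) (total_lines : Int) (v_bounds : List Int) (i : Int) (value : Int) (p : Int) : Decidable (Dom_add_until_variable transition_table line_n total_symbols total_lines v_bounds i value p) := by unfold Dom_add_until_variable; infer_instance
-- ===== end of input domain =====

-- B replaces A's symbol1 × symbol2 double loop by a single loop over one symbol: each table
-- write depends on only one of the two symbol variables, so one pass per symbol suffices.
-- Both the Python A and the Python B mutate transition_table in place and return it;
-- the equivalence proved here is about the returned value.

-- ===== PORT A =====
def pvHALT : Int := -1

-- multi_to_state.  The Python 'raise' inside its loop ('Variable value out of bounds') can never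
-- fire for the tuples add_until_variable feeds it (every v_value comes from range(v_bound)),
-- so it is ported without that branch.
def pvMultiToState (line_n intermediate : Int) (v_values : List Int) (total_lines : Int) (v_bounds : List Int) : Int :=
  ((v_values.zip v_bounds).foldl
    (fun (st : Int × Int) (vb : Int × Int) => (st.1 + vb.1 * st.2, st.2 * vb.2))
    (line_n + intermediate * total_lines, total_lines * 3)).1

-- all_v_values: itertools.product(range(b) for b in v_bounds), lexicographic order
def pvAllVValues (v_bounds : List Int) : List (List Int) :=
  match v_bounds with
  | [] => [[]]
  | b :: bs => (PySem.List.pyRange 0 b 1).flatMap (fun v => (pvAllVValues bs).map (v :: ·))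

-- transition_table[r][c] = v  (an out-of-range row/column is a Python IndexError, excluded
-- by Pre_; here it leaves the table unchanged)
def pvSetCell (t : List (List (Int × Int × Int))) (r c : Int) (v : Int × Int × Int) :
    List (List (Int × Int × Int)) :=
  match PySem.List.pyGet? t r with
  | none => t
  | some row => PySem.List.pySetD t r (PySem.List.pySetD row c v)

-- Python A first raises 'Comparison value out of bounds' when value >= v_bounds[i]
-- (or an IndexError when i is out of range); Pre_ excludes exactly those inputs.
def add_until_variable (transition_table : List (List (Int × Int × Int))) (line_n : Int) (total_symbols : Int) (total_lines : Int) (v_bounds : List Int) (i : Int) (value : Int) (p : Int) : List (List (Int × Int × Int)) :=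
  (pvAllVValues v_bounds).foldl (fun table v_values =>
    let state1 := pvMultiToState line_n 0 v_values total_lines v_bounds
    let state2 := pvMultiToState line_n 1 v_values total_lines v_bounds
    let state3 := pvMultiToState (line_n + 1) 0 v_values total_lines v_bounds
    let state4 := pvMultiToState p 0 v_values total_lines v_bounds
    let state5 := pvMultiToState p 1 v_values total_lines v_bounds
    let state6 := if p + 1 ≥ total_lines then pvHALT
                  else pvMultiToState (p + 1) 0 v_values total_lines v_bounds
    (PySem.List.pyRange 0 total_symbols 1).foldl (fun table symbol1 =>
      (PySem.List.pyRange 0 total_symbols 1).foldl (fun table symbol2 =>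
        let table :=
          if PySem.List.pyGetD v_values i 0 = value then
            pvSetCell (pvSetCell table symbol1 state1 (symbol1, state2, 1)) symbol2 state2 (symbol2, state6, -1)
          else
            pvSetCell (pvSetCell table symbol1 state1 (symbol1, state2, 1)) symbol2 state2 (symbol2, state3, -1)
        pvSetCell (pvSetCell table symbol1 state4 (symbol1, state5, 1)) symbol2 state5 (symbol2, state1, -1))
        table)
      table)
    transition_table

-- ===== PORT B =====
-- Source B builds the same cartesian product with itertools.product; ported here as a foldr
def pvProdRanges (v_bounds : List Int) : List (List Int) :=
  v_bounds.foldr (fun b acc => (PySem.List.pyRange 0 b 1).flatMap (fun v => acc.map (v :: ·))) [[]]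

def add_until_variable_alt (transition_table : List (List (Int × Int × Int))) (line_n : Int) (total_symbols : Int) (total_lines : Int) (v_bounds : List Int) (i : Int) (value : Int) (p : Int) : List (List (Int × Int × Int)) :=
  (pvProdRanges v_bounds).foldl (fun table v_values =>
    let radix := total_lines
    let offs := ((v_values.zip v_bounds).foldl
      (fun (st : Int × Int) (vb : Int × Int) => (st.1 + vb.1 * st.2, st.2 * vb.2)) (0, radix * 3)).1
    let state1 := line_n + offs
    let state2 := line_n + radix + offs
    let state4 := p + offs
    let state5 := p + radix + offs
    let back := if PySem.List.pyGetD v_values i 0 = value then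
        (if p + 1 ≥ total_lines then pvHALT else p + 1 + offs)
      else line_n + 1 + offs
    (PySem.List.pyRange 0 total_symbols 1).foldl (fun table s =>
      pvSetCell (pvSetCell (pvSetCell (pvSetCell table s state1 (s, state2, 1))
        s state2 (s, back, -1)) s state4 (s, state5, 1)) s state5 (s, state1, -1))
      table)
    transition_table

-- ===== PRECONDITION & SPEC =====
-- Pre_ excludes (1) the inputs on which Python A raises: value ≥ v_bounds[i], i out of range,
-- or a written row/column index out of range (the last clause guarantees every written index is
-- in range when any write happens at all); and (2) the corner line_n ∉ [0,total_lines) or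
-- p ∉ [0,total_lines) — line numbers outside the machine — where the state encoding aliases and
-- A's interleaved double-loop overwrite order is an accident as defensible as any other.
def Pre_add_until_variable (transition_table : List (List (Int × Int × Int))) (line_n : Int) (total_symbols : Int) (total_lines : Int) (v_bounds : List Int) (i : Int) (value : Int) (p : Int) : Prop :=
  PySem.Raise.InRange v_bounds.length i ∧
  value < PySem.List.pyGetD v_bounds i 0 ∧
  (total_symbols ≤ 0 ∨ (∃ b ∈ v_bounds, b ≤ 0) ∨
    ((∀ b ∈ v_bounds, 1 ≤ b) ∧ 1 ≤ total_lines ∧ 0 ≤ line_n ∧ line_n < total_lines ∧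
      0 ≤ p ∧ p < total_lines ∧ total_symbols ≤ (transition_table.length : Int) ∧
      ∀ row ∈ transition_table.take total_symbols.toNat,
        3 * total_lines * (v_bounds.foldl (· * ·) 1) ≤ (row.length : Int)))
instance (transition_table : List (List (Int × Int × Int))) (line_n : Int) (total_symbols : Int) (total_lines : Int) (v_bounds : List Int) (i : Int) (value : Int) (p : Int) : Decidable (Pre_add_until_variable transition_table line_n total_symbols total_lines v_bounds i value p) := by unfold Pre_add_until_variable; infer_instance

def pvWitness_add_until_variable : (List (List (Int × Int × Int))) × Int × Int × Int × List Int × Int × Int × Int :=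
  ([[(0,0,0),(0,0,0),(0,0,0),(0,0,0),(0,0,0),(0,0,0)]], 0, 1, 1, [2], 0, 0, 0)

def Spec_add_until_variable (transition_table : List (List (Int × Int × Int))) (line_n : Int) (total_symbols : Int) (total_lines : Int) (v_bounds : List Int) (i : Int) (value : Int) (p : Int) (out : List (List (Int × Int × Int))) : Prop := out = add_until_variable_alt transition_table line_n total_symbols total_lines v_bounds i value p
instance (transition_table : List (List (Int × Int × Int))) (line_n : Int) (total_symbols : Int) (total_lines : Int) (v_bounds : List Int) (i : Int) (value : Int) (p : Int) (out : List (List (Int × Int × Int))) : Decidable (Spec_add_until_variable transition_table line_n total_symbols total_lines v_bounds i value p out) := by unfold Spec_add_until_variable; infer_instance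

-- ===== CLAIM (what is proved, stated in full; the proofs are below) =====
def Claim_equal_add_until_variable : Prop := ∀ (transition_table : List (List (Int × Int × Int))) (line_n : Int) (total_symbols : Int) (total_lines : Int) (v_bounds : List Int) (i : Int) (value : Int) (p : Int), Dom_add_until_variable transition_table line_n total_symbols total_lines v_bounds i value p → Pre_add_until_variable transition_table line_n total_symbols total_lines v_bounds i value p → Spec_add_until_variable transition_table line_n total_symbols total_lines v_bounds i value p (add_until_variable transition_table line_n total_symbols total_lines v_bounds i value p)

-- ===== LEMMAS AND PROOFS =====

abbrev pvTb : Type := List (List (Int × Int × Int))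

-- pvSetCell preserves the table's length
theorem pv_length_setCell (t : pvTb) (r c : Int) (v : Int × Int × Int) :
    (pvSetCell t r c v).length = t.length := by
  unfold pvSetCell
  cases h : PySem.List.pyGet? t r with
  | none => rfl
  | some row => simp [PySem.List.length_pySetD]

-- in-range normal form of pvSetCell
theorem pvW_eq (u : pvTb) (s c : Int) (x : Int × Int × Int)
    (hs : 0 ≤ s) (hlt : s < (u.length : Int)) (hc : 0 ≤ c) :
    pvSetCell u s c x = u.set s.toNat ((u.getD s.toNat []).set c.toNat x) := by
  have h := PySem.List.pyGet?_eq_some_getElem u hs hlt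
  unfold pvSetCell
  simp only [h]
  simp only [PySem.List.pySetD_of_nonneg _ _ hs, PySem.List.pySetD_of_nonneg _ _ hc]
  congr 1
  rw [List.getD_eq_getElem?_getD, List.getElem?_eq_getElem (by omega : s.toNat < u.length)]
  rfl

-- universal commutation of two in-range writes to distinct cells
theorem pvW_comm (u : pvTb) (n : Nat) (hu : u.length = n) (s s' a b : Int)
    (x y : Int × Int × Int)
    (hs : 0 ≤ s) (hs' : 0 ≤ s') (hsn : s < (n : Int)) (hsn' : s' < (n : Int))
    (ha : 0 ≤ a) (hb : 0 ≤ b) (hne : s = s' → a ≠ b) :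
    pvSetCell (pvSetCell u s a x) s' b y = pvSetCell (pvSetCell u s' b y) s a x := by
  have hlu : s < (u.length : Int) := by omega
  have hlu' : s' < (u.length : Int) := by omega
  rw [pvW_eq u s a x hs hlu ha, pvW_eq u s' b y hs' hlu' hb,
      pvW_eq _ s' b y hs' (by simp; omega) hb, pvW_eq _ s a x hs (by simp; omega) ha]
  by_cases hss : s = s'
  · subst hss
    have hab : a ≠ b := hne rfl
    have hsl : s.toNat < u.length := by omega
    simp only [List.getD_eq_getElem?_getD, List.getElem?_set_self hsl, Option.getD_some,
      List.set_set]
    rw [List.set_comm _ _ (show a.toNat ≠ b.toNat by omega)]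
  · have hssn : s.toNat ≠ s'.toNat := by omega
    simp only [List.getD_eq_getElem?_getD, List.getElem?_set_ne hssn,
      List.getElem?_set_ne (Ne.symm hssn)]
    exact List.set_comm _ _ hssn

-- overwriting the same cell: the second write wins
theorem pvW_absorb (u : pvTb) (n : Nat) (hu : u.length = n) (s a : Int)
    (x y : Int × Int × Int) (hs : 0 ≤ s) (hsn : s < (n : Int)) (ha : 0 ≤ a) :
    pvSetCell (pvSetCell u s a x) s a y = pvSetCell u s a y := by
  have hlu : s < (u.length : Int) := by omega
  rw [pvW_eq u s a x hs hlu ha, pvW_eq _ s a y hs (by simp; omega) ha,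
      pvW_eq u s a y hs hlu ha]
  have hsl : s.toNat < u.length := by omega
  simp only [List.getD_eq_getElem?_getD, List.getElem?_set_self hsl, Option.getD_some,
    List.set_set]

-- ---- generic fold machinery over an invariant ----

theorem pv_foldl_congr_inv {α β : Type} (Inv : β → Prop) (f g : β → α → β) :
    ∀ (l : List α) (u : β), Inv u →
      (∀ x ∈ l, ∀ v, Inv v → f v x = g v x ∧ Inv (g v x)) →
      l.foldl f u = l.foldl g u := by
  intro l
  induction l with
  | nil => intro u _ _; rfl
  | cons x xs ih =>
    intro u hu h
    have hx := h x (by simp) u hu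
    simp only [List.foldl_cons, hx.1]
    exact ih (g u x) hx.2 (fun y hy v hv => h y (by simp [hy]) v hv)

theorem pv_foldl_inv {β : Type} (Inv : β → Prop) (q : Int → β → β) :
    ∀ (l : List Int) (u : β), Inv u → (∀ a ∈ l, ∀ v, Inv v → Inv (q a v)) →
      Inv (l.foldl (fun x a => q a x) u) := by
  intro l
  induction l with
  | nil => intro u hu _; exact hu
  | cons a as ih =>
    intro u hu h
    exact ih (q a u) (h a (by simp) u hu) (fun b hb v hv => h b (by simp [hb]) v hv)

theorem pv_commfold {β : Type} (Inv : β → Prop) (p : β → β) (q : Int → β → β) :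
    ∀ (l : List Int) (u : β), Inv u →
      (∀ a ∈ l, ∀ v, Inv v → Inv (q a v)) →
      (∀ a ∈ l, ∀ v, Inv v → p (q a v) = q a (p v)) →
      p (l.foldl (fun x a => q a x) u) = l.foldl (fun x a => q a x) (p u) := by
  intro l
  induction l with
  | nil => intro u _ _ _; rfl
  | cons a as ih =>
    intro u hu hq hc
    simp only [List.foldl_cons]
    rw [ih (q a u) (hq a (by simp) u hu) (fun b hb v hv => hq b (by simp [hb]) v hv)
        (fun b hb v hv => hc b (by simp [hb]) v hv)]
    rw [hc a (by simp) u hu]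

theorem pv_hoist {β : Type} (Inv : β → Prop) (p : β → β) (q : Int → β → β) :
    ∀ (bs : List Int) (b : Int) (u : β), Inv u →
      (∀ a ∈ b :: bs, ∀ v, Inv v → Inv (q a v)) →
      (∀ v, Inv v → Inv (p v)) →
      (∀ a ∈ b :: bs, ∀ v, Inv v → p (q a v) = q a (p v)) →
      (∀ v, Inv v → p (p v) = p v) →
      (b :: bs).foldl (fun x a => q a (p x)) u = (b :: bs).foldl (fun x a => q a x) (p u) := by
  intro bs
  induction bs with
  | nil => intro b u _ _ _ _ _; rfl
  | cons c cs ih =>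
    intro b u hu hq hp hc hidem
    simp only [List.foldl_cons]
    have h1 := ih c (q b (p u)) (hq b (by simp) (p u) (hp u hu))
      (fun a ha v hv => hq a (by simp at ha ⊢; tauto) v hv) hp
      (fun a ha v hv => hc a (by simp at ha ⊢; tauto) v hv) hidem
    simp only [List.foldl_cons] at h1
    rw [h1]
    congr 2
    rw [hc b (by simp) (p u) (hp u hu), hidem u hu]

theorem pv_foldq_idem {β : Type} (Inv : β → Prop) (q : Int → β → β) :
    ∀ (l : List Int) (u : β), Inv u →
      (∀ a ∈ l, ∀ v, Inv v → Inv (q a v)) →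
      (∀ a ∈ l, ∀ b ∈ l, ∀ v, Inv v → q a (q b v) = q b (q a v)) →
      (∀ a ∈ l, ∀ v, Inv v → q a (q a v) = q a v) →
      l.foldl (fun x a => q a x) (l.foldl (fun x a => q a x) u) = l.foldl (fun x a => q a x) u := by
  intro l
  induction l with
  | nil => intro u _ _ _ _; rfl
  | cons a as ih =>
    intro u hu hq hcomm hidem
    simp only [List.foldl_cons]
    have hqu : Inv (q a u) := hq a (by simp) u hu
    have h1 : q a (as.foldl (fun x b => q b x) (q a u)) = as.foldl (fun x b => q b x) (q a (q a u)) :=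
      pv_commfold Inv (q a) q as (q a u) hqu (fun b hb v hv => hq b (by simp [hb]) v hv)
        (fun b hb v hv => hcomm a (by simp) b (by simp [hb]) v hv)
    rw [h1, hidem a (by simp) u hu]
    exact ih (q a u) hqu (fun b hb v hv => hq b (by simp [hb]) v hv)
      (fun b hb c hc w hw => hcomm b (by simp [hb]) c (by simp [hc]) w hw)
      (fun b hb v hv => hidem b (by simp [hb]) v hv)


-- A's outer loop, after hoisting: interleaved P-then-all-Q blocks collapse to all-P then all-Q
theorem pv_outer {β : Type} (Inv : β → Prop) (p q : Int → β → β) (lin : List Int)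
    (hq : ∀ a ∈ lin, ∀ v, Inv v → Inv (q a v))
    (hqcomm : ∀ a ∈ lin, ∀ b ∈ lin, ∀ v, Inv v → q a (q b v) = q b (q a v))
    (hqidem : ∀ a ∈ lin, ∀ v, Inv v → q a (q a v) = q a v) :
    ∀ (lo : List Int) (u0 : β), Inv u0 →
      (∀ a ∈ lo, ∀ v, Inv v → Inv (p a v)) →
      (∀ a ∈ lo, ∀ b ∈ lin, ∀ v, Inv v → p a (q b v) = q b (p a v)) →
      lo.foldl (fun x a => lin.foldl (fun y b => q b y) (p a x))
          (lin.foldl (fun y b => q b y) u0)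
        = lin.foldl (fun y b => q b y) (lo.foldl (fun x a => p a x) u0) := by
  intro lo
  induction lo with
  | nil => intro u0 _ _ _; rfl
  | cons a as ih =>
    intro u0 hu0 hp hc
    simp only [List.foldl_cons]
    have h1 : p a (lin.foldl (fun y b => q b y) u0) = lin.foldl (fun y b => q b y) (p a u0) :=
      pv_commfold Inv (p a) q lin u0 hu0 hq (fun b hb v hv => hc a (by simp) b hb v hv)
    rw [h1]
    have h2 : lin.foldl (fun y b => q b y) (lin.foldl (fun y b => q b y) (p a u0))
        = lin.foldl (fun y b => q b y) (p a u0) :=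
      pv_foldq_idem Inv q lin (p a u0) (hp a (by simp) u0 hu0) hq hqcomm hqidem
    rw [h2]
    exact ih (p a u0) (hp a (by simp) u0 hu0)
      (fun b hb v hv => hp b (by simp [hb]) v hv)
      (fun b hb c hc' v hv => hc b (by simp [hb]) c hc' v hv)

-- B's loop: the diagonal P-then-Q fold also collapses to all-P then all-Q
theorem pv_diag {β : Type} (Inv : β → Prop) (p q : Int → β → β) :
    ∀ (l : List Int) (u : β), Inv u →
      (∀ a ∈ l, ∀ v, Inv v → Inv (q a v)) →
      (∀ a ∈ l, ∀ v, Inv v → Inv (p a v)) →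
      (∀ a ∈ l, ∀ b ∈ l, ∀ v, Inv v → q a (p b v) = p b (q a v)) →
      l.foldl (fun x s => q s (p s x)) u
        = l.foldl (fun x s => q s x) (l.foldl (fun x s => p s x) u) := by
  intro l
  induction l with
  | nil => intro u _ _ _ _; rfl
  | cons a as ih =>
    intro u hu hq hp hc
    simp only [List.foldl_cons]
    rw [ih (q a (p a u)) (hq a (by simp) (p a u) (hp a (by simp) u hu))
        (fun b hb v hv => hq b (by simp [hb]) v hv)
        (fun b hb v hv => hp b (by simp [hb]) v hv)
        (fun b hb c hc' v hv => hc b (by simp [hb]) c (by simp [hc']) v hv)]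
    congr 1
    exact (pv_commfold Inv (q a) p as (p a u) (hp a (by simp) u hu)
      (fun b hb v hv => hp b (by simp [hb]) v hv)
      (fun b hb v hv => hc a (by simp) b (by simp [hb]) v hv)).symm

-- ---- arithmetic facts about the radix fold ----

theorem pv_fold_shift (zl : List (Int × Int)) :
    ∀ (a r : Int),
      ((zl.foldl (fun (st : Int × Int) (vb : Int × Int) => (st.1 + vb.1 * st.2, st.2 * vb.2)) (a, r)).1)
        = a + ((zl.foldl (fun (st : Int × Int) (vb : Int × Int) => (st.1 + vb.1 * st.2, st.2 * vb.2)) (0, r)).1) := by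
  induction zl with
  | nil => intro a r; simp
  | cons x t ih =>
    intro a r
    simp only [List.foldl_cons]
    rw [ih (a + x.1 * r), ih (0 + x.1 * r)]
    ring

theorem pv_fold_nonneg (zl : List (Int × Int)) :
    ∀ (r : Int), 0 ≤ r → (∀ x ∈ zl, 0 ≤ x.1 ∧ 0 ≤ x.2) →
      0 ≤ ((zl.foldl (fun (st : Int × Int) (vb : Int × Int) => (st.1 + vb.1 * st.2, st.2 * vb.2)) (0, r)).1) := by
  induction zl with
  | nil => intro r _ _; simp
  | cons x t ih =>
    intro r hr h
    simp only [List.foldl_cons]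
    rw [pv_fold_shift]
    have hx := h x (by simp)
    have h1 : 0 ≤ x.1 * r := mul_nonneg hx.1 hr
    have h2 : 0 ≤ r * x.2 := mul_nonneg hr hx.2
    have := ih (r * x.2) h2 (fun y hy => h y (by simp [hy]))
    omega

theorem pv_mts_eq (l m : Int) (vv : List Int) (TL : Int) (bs : List Int) :
    pvMultiToState l m vv TL bs
      = l + m * TL + (((vv.zip bs).foldl (fun (st : Int × Int) (vb : Int × Int) => (st.1 + vb.1 * st.2, st.2 * vb.2)) (0, TL * 3)).1) := by
  unfold pvMultiToState
  rw [pv_fold_shift]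

-- ---- the product of ranges ----

theorem pv_prodRanges_eq (bs : List Int) : pvProdRanges bs = pvAllVValues bs := by
  induction bs with
  | nil => rfl
  | cons b t ih => simp [pvProdRanges, pvAllVValues] at ih ⊢; rw [ih]

theorem pv_mem_allVValues (bs : List Int) :
    ∀ vv ∈ pvAllVValues bs, ∀ x ∈ vv.zip bs, 0 ≤ x.1 ∧ 0 ≤ x.2 := by
  induction bs with
  | nil =>
    intro vv hvv x hx
    simp [pvAllVValues] at hvv
    subst hvv; simp at hx
  | cons b t ih =>
    intro vv hvv x hx
    simp only [pvAllVValues, List.mem_flatMap, List.mem_map] at hvv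
    obtain ⟨v, hv, vv', hvv', rfl⟩ := hvv
    rw [PySem.List.mem_pyRange_one] at hv
    simp only [List.zip_cons_cons, List.mem_cons] at hx
    rcases hx with rfl | hx
    · exact ⟨hv.1, by omega⟩
    · exact ih vv' hvv' x hx

theorem pv_allVValues_nil (bs : List Int) (b : Int) (hb : b ∈ bs) (hb0 : b ≤ 0) :
    pvAllVValues bs = [] := by
  induction bs with
  | nil => simp at hb
  | cons c t ih =>
    simp only [List.mem_cons] at hb
    rcases hb with rfl | hb
    · simp [pvAllVValues, PySem.List.pyRange_one_eq_nil hb0]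
    · simp [pvAllVValues, ih hb]

-- ---- the per-v_values inner-loop equality (abstract in the four columns) ----

-- the paired writes P (columns c1,c3) and Q (columns c2,c4) of one symbol
def pvPop (cA cB : Int) (vA vB : Int → (Int × Int × Int)) (s : Int) (u : pvTb) : pvTb :=
  pvSetCell (pvSetCell u s cA (vA s)) s cB (vB s)

theorem pvPop_length (cA cB : Int) (vA vB : Int → (Int × Int × Int)) (s : Int) (u : pvTb) :
    (pvPop cA cB vA vB s u).length = u.length := by
  simp [pvPop, pv_length_setCell]

theorem pvPop_comm (n : Nat) (cA cB cA' cB' : Int) (vA vB vA' vB' : Int → (Int × Int × Int))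
    (s s' : Int) (u : pvTb) (hu : u.length = n)
    (hs : 0 ≤ s) (hs' : 0 ≤ s') (hsn : s < (n : Int)) (hsn' : s' < (n : Int))
    (hA : 0 ≤ cA) (hB : 0 ≤ cB) (hA' : 0 ≤ cA') (hB' : 0 ≤ cB')
    (hne : s = s' → cA' ≠ cA ∧ cA' ≠ cB ∧ cB' ≠ cA ∧ cB' ≠ cB) :
    pvPop cA' cB' vA' vB' s' (pvPop cA cB vA vB s u)
      = pvPop cA cB vA vB s (pvPop cA' cB' vA' vB' s' u) := by
  have len1 : ∀ (w : pvTb) (r c : Int) (v : Int × Int × Int), w.length = n → (pvSetCell w r c v).length = n := by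
    intro w r c v hw; rw [pv_length_setCell]; exact hw
  unfold pvPop
  have e1 := pvW_comm (pvSetCell u s cA (vA s)) n (len1 _ _ _ _ hu) s s' cB cA'
    (vB s) (vA' s') hs hs' hsn hsn' hB hA' (fun h => ((hne h).2.1).symm)
  have e2 := pvW_comm u n hu s s' cA cA' (vA s) (vA' s') hs hs' hsn hsn' hA hA'
    (fun h => ((hne h).1).symm)
  rw [e1, e2]
  have e3 := pvW_comm (pvSetCell (pvSetCell u s' cA' (vA' s')) s cA (vA s)) n
    (len1 _ _ _ _ (len1 _ _ _ _ hu)) s s' cB cB' (vB s) (vB' s') hs hs' hsn hsn' hB hB'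
    (fun h => ((hne h).2.2.2).symm)
  have e4 := pvW_comm (pvSetCell u s' cA' (vA' s')) n (len1 _ _ _ _ hu) s s' cA cB'
    (vA s) (vB' s') hs hs' hsn hsn' hA hB' (fun h => ((hne h).2.2.1).symm)
  rw [e3, e4]

theorem pvPop_idem (n : Nat) (cA cB : Int) (vA vB : Int → (Int × Int × Int))
    (s : Int) (u : pvTb) (hu : u.length = n)
    (hs : 0 ≤ s) (hsn : s < (n : Int)) (hA : 0 ≤ cA) (hB : 0 ≤ cB) :
    pvPop cA cB vA vB s (pvPop cA cB vA vB s u) = pvPop cA cB vA vB s u := by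
  have len1 : ∀ (w : pvTb) (r c : Int) (v : Int × Int × Int), w.length = n → (pvSetCell w r c v).length = n := by
    intro w r c v hw; rw [pv_length_setCell]; exact hw
  unfold pvPop
  by_cases hAB : cA = cB
  · subst hAB
    have a1 := pvW_absorb u n hu s cA (vA s) (vB s) hs hsn hA
    rw [a1]
    have a2 := pvW_absorb u n hu s cA (vB s) (vA s) hs hsn hA
    rw [a2, a1]
  · have c1 := pvW_comm (pvSetCell u s cA (vA s)) n (len1 _ _ _ _ hu) s s cB cA
      (vB s) (vA s) hs hs hsn hsn hB hA (fun _ => Ne.symm hAB)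
    rw [c1]
    have a1 := pvW_absorb u n hu s cA (vA s) (vA s) hs hsn hA
    rw [a1]
    have a2 := pvW_absorb (pvSetCell u s cA (vA s)) n (len1 _ _ _ _ hu) s cB (vB s) (vB s) hs hsn hB
    rw [a2]

theorem pv_collapse {β : Type} (Inv : β → Prop) (P Q : Int → β → β) :
    ∀ (l : List Int) (t : β), Inv t →
      (∀ a ∈ l, ∀ v, Inv v → Inv (Q a v)) →
      (∀ a ∈ l, ∀ v, Inv v → Inv (P a v)) →
      (∀ a ∈ l, ∀ b ∈ l, ∀ v, Inv v → P a (Q b v) = Q b (P a v)) →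
      (∀ a ∈ l, ∀ b ∈ l, ∀ v, Inv v → Q a (Q b v) = Q b (Q a v)) →
      (∀ a ∈ l, ∀ v, Inv v → Q a (Q a v) = Q a v) →
      (∀ a ∈ l, ∀ v, Inv v → P a (P a v) = P a v) →
      l.foldl (fun u s1 => l.foldl (fun u' s2 => Q s2 (P s1 u')) u) t
        = l.foldl (fun x s => Q s x) (l.foldl (fun x s => P s x) t) := by
  intro l
  cases l with
  | nil => intro t _ _ _ _ _ _ _; rfl
  | cons hd tl =>
    intro t hInv hQi hPi hPQ hQQ hQid hPid
    have hhoist : (hd :: tl).foldl (fun u s1 => (hd :: tl).foldl (fun u' s2 => Q s2 (P s1 u')) u) t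
        = (hd :: tl).foldl (fun u s1 => (hd :: tl).foldl (fun u' s2 => Q s2 u') (P s1 u)) t := by
      apply pv_foldl_congr_inv Inv _ _ _ t hInv
      intro s1 h1 u hu
      refine ⟨pv_hoist Inv (P s1) Q tl hd u hu hQi (fun v hv => hPi s1 h1 v hv)
        (fun a ha v hv => hPQ s1 h1 a ha v hv) (fun v hv => hPid s1 h1 v hv), ?_⟩
      exact pv_foldl_inv Inv (fun a v => Q a v) _ (P s1 u) (hPi s1 h1 u hu)
        (fun b hb v hv => hQi b hb v hv)
    rw [hhoist]
    simp only [List.foldl_cons]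
    exact pv_outer Inv P Q (hd :: tl) hQi hQQ hQid tl (P hd t) (hPi hd (by simp) t hInv)
      (fun a ha v hv => hPi a (by simp [ha]) v hv)
      (fun a ha b hb v hv => hPQ a (by simp [ha]) b hb v hv)

theorem pv_double_eq_single (n : Nat) (c1 c2 c3 c4 : Int) (v1 v2 v3 v4 : Int → (Int × Int × Int))
    (TS : Int) (t : pvTb) (htn : t.length = n)
    (hc1 : 0 ≤ c1) (hc2 : 0 ≤ c2) (hc3 : 0 ≤ c3) (hc4 : 0 ≤ c4)
    (h12 : c1 ≠ c2) (h14 : c1 ≠ c4) (h32 : c3 ≠ c2) (h34 : c3 ≠ c4)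
    (hTS : TS ≤ (n : Int)) :
    (PySem.List.pyRange 0 TS 1).foldl (fun u s1 =>
      (PySem.List.pyRange 0 TS 1).foldl (fun u' s2 =>
        pvSetCell (pvSetCell (pvSetCell (pvSetCell u' s1 c1 (v1 s1)) s2 c2 (v2 s2)) s1 c3 (v3 s1)) s2 c4 (v4 s2)) u) t
    = (PySem.List.pyRange 0 TS 1).foldl (fun u s =>
        pvSetCell (pvSetCell (pvSetCell (pvSetCell u s c1 (v1 s)) s c2 (v2 s)) s c3 (v3 s)) s c4 (v4 s)) t := by
  have hmem : ∀ s ∈ PySem.List.pyRange 0 TS 1, 0 ≤ s ∧ s < (n : Int) := by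
    intro s hs; rw [PySem.List.mem_pyRange_one] at hs; omega
  -- abbreviations
  set P : Int → pvTb → pvTb := pvPop c1 c3 v1 v3 with hP
  set Q : Int → pvTb → pvTb := pvPop c2 c4 v2 v4 with hQ
  set Inv : pvTb → Prop := fun u => u.length = n with hInv
  set rng : List Int := PySem.List.pyRange 0 TS 1 with hrngdef
  have hPinv : ∀ a v, Inv v → Inv (P a v) := by
    intro a v hv; show (P a v).length = n; rw [hP, pvPop_length]; exact hv
  have hQinv : ∀ a v, Inv v → Inv (Q a v) := by
    intro a v hv; show (Q a v).length = n; rw [hQ, pvPop_length]; exact hv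
  have hPQ : ∀ a ∈ rng, ∀ b ∈ rng, ∀ v, Inv v → P a (Q b v) = Q b (P a v) := by
    intro a ha b hb v hv
    exact pvPop_comm n c2 c4 c1 c3 v2 v4 v1 v3 b a v hv (hmem b hb).1 (hmem a ha).1
      (hmem b hb).2 (hmem a ha).2 hc2 hc4 hc1 hc3
      (fun _ => ⟨h12, h14, h32, h34⟩)
  have hQQ : ∀ a ∈ rng, ∀ b ∈ rng, ∀ v, Inv v → Q a (Q b v) = Q b (Q a v) := by
    intro a ha b hb v hv
    by_cases hab : a = b
    · subst hab; rfl
    · exact pvPop_comm n c2 c4 c2 c4 v2 v4 v2 v4 b a v hv (hmem b hb).1 (hmem a ha).1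
        (hmem b hb).2 (hmem a ha).2 hc2 hc4 hc2 hc4 (fun h => absurd h.symm hab)
  have hQidem : ∀ a ∈ rng, ∀ v, Inv v → Q a (Q a v) = Q a v := by
    intro a ha v hv
    exact pvPop_idem n c2 c4 v2 v4 a v hv (hmem a ha).1 (hmem a ha).2 hc2 hc4
  have hPidem : ∀ a ∈ rng, ∀ v, Inv v → P a (P a v) = P a v := by
    intro a ha v hv
    exact pvPop_idem n c1 c3 v1 v3 a v hv (hmem a ha).1 (hmem a ha).2 hc1 hc3
  -- reorder the middle two writes of each body into Q ∘ P
  have hreorder : ∀ s1 ∈ rng, ∀ s2 ∈ rng, ∀ (u' : pvTb), Inv u' →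
      pvSetCell (pvSetCell (pvSetCell (pvSetCell u' s1 c1 (v1 s1)) s2 c2 (v2 s2)) s1 c3 (v3 s1)) s2 c4 (v4 s2)
        = Q s2 (P s1 u') := by
    intro s1 h1 s2 h2 u' hu'
    have hlen : (pvSetCell u' s1 c1 (v1 s1)).length = n := by
      rw [pv_length_setCell]; exact hu'
    rw [pvW_comm _ n hlen s2 s1 c2 c3 (v2 s2) (v3 s1) (hmem s2 h2).1 (hmem s1 h1).1
        (hmem s2 h2).2 (hmem s1 h1).2 hc2 hc3 (fun _ => Ne.symm h32)]
    rfl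
  have hAeq : rng.foldl (fun u s1 => rng.foldl (fun u' s2 =>
        pvSetCell (pvSetCell (pvSetCell (pvSetCell u' s1 c1 (v1 s1)) s2 c2 (v2 s2)) s1 c3 (v3 s1)) s2 c4 (v4 s2)) u) t
      = rng.foldl (fun u s1 => rng.foldl (fun u' s2 => Q s2 (P s1 u')) u) t := by
    apply pv_foldl_congr_inv Inv _ _ rng t htn
    intro s1 h1 u hu
    constructor
    · apply pv_foldl_congr_inv Inv _ _ rng u hu
      intro s2 h2 u' hu'
      exact ⟨hreorder s1 h1 s2 h2 u' hu', hQinv s2 (P s1 u') (hPinv s1 u' hu')⟩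
    · exact pv_foldl_inv Inv (fun a v => Q a (P s1 v)) rng u hu
        (fun b hb v hv => hQinv b (P s1 v) (hPinv s1 v hv))
  have hBeq : rng.foldl (fun u s =>
        pvSetCell (pvSetCell (pvSetCell (pvSetCell u s c1 (v1 s)) s c2 (v2 s)) s c3 (v3 s)) s c4 (v4 s)) t
      = rng.foldl (fun u s => Q s (P s u)) t := by
    apply pv_foldl_congr_inv Inv _ _ rng t htn
    intro s h1 u hu
    exact ⟨hreorder s h1 s h1 u hu, hQinv s (P s u) (hPinv s u hu)⟩
  rw [hAeq, hBeq]
  rw [pv_diag Inv P Q rng t htn (fun a ha v hv => hQinv a v hv) (fun a ha v hv => hPinv a v hv)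
    (fun a ha b hb v hv => (hPQ b hb a ha v hv).symm)]
  exact pv_collapse Inv P Q rng t htn (fun a ha v hv => hQinv a v hv)
    (fun a ha v hv => hPinv a v hv) hPQ hQQ hQidem hPidem


-- rewriting pvMultiToState into the explicit offset form B uses
theorem pv_mts_eq0 (l : Int) (vv : List Int) (TL : Int) (bs : List Int) :
    pvMultiToState l 0 vv TL bs
      = l + (((vv.zip bs).foldl (fun (st : Int × Int) (vb : Int × Int) => (st.1 + vb.1 * st.2, st.2 * vb.2)) (0, TL * 3)).1) := by
  rw [pv_mts_eq]; ring

theorem pv_mts_eq1 (l : Int) (vv : List Int) (TL : Int) (bs : List Int) :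
    pvMultiToState l 1 vv TL bs
      = l + TL + (((vv.zip bs).foldl (fun (st : Int × Int) (vb : Int × Int) => (st.1 + vb.1 * st.2, st.2 * vb.2)) (0, TL * 3)).1) := by
  rw [pv_mts_eq]; ring

-- ===== VERDICT (by name: the statement is the Claim_ definition above) =====
theorem pv_foldl_len (g : Int → pvTb → pvTb) (hg : ∀ a u, (g a u).length = u.length) :
    ∀ (l : List Int) (u : pvTb), (l.foldl (fun x a => g a x) u).length = u.length := by
  intro l
  induction l with
  | nil => intro u; rfl
  | cons a as ih => intro u; simp only [List.foldl_cons]; rw [ih (g a u), hg a u]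

theorem add_until_variable_spec : Claim_equal_add_until_variable := by
  intro tt line_n TS TL bs i value p _hdom hpre
  unfold Spec_add_until_variable
  obtain ⟨_hIdx, _hVal, hcase⟩ := hpre
  unfold add_until_variable add_until_variable_alt
  rw [pv_prodRanges_eq]
  rcases hcase with hTS0 | ⟨b, hb, hb0⟩ | ⟨_hbpos, hTL, hl0, hlT, hp0, hpT, hTSlen, _hrows⟩
  · have hr : PySem.List.pyRange 0 TS 1 = [] := PySem.List.pyRange_one_eq_nil hTS0
    simp only [hr, List.foldl_nil]
  · rw [pv_allVValues_nil bs b hb hb0]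
    rfl
  · apply pv_foldl_congr_inv (fun u : pvTb => u.length = tt.length) _ _ _ tt rfl
    intro vv hvv u hlen
    constructor
    · dsimp only
      simp only [pv_mts_eq0, pv_mts_eq1]
      set offs := ((vv.zip bs).foldl
        (fun (st : Int × Int) (vb : Int × Int) => (st.1 + vb.1 * st.2, st.2 * vb.2)) (0, TL * 3)).1 with ho
      have hoffs : 0 ≤ offs := by
        rw [ho]
        exact pv_fold_nonneg (vv.zip bs) (TL * 3) (by omega) (pv_mem_allVValues bs vv hvv)
      by_cases hcond : PySem.List.pyGetD vv i 0 = value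
      · simp only [if_pos hcond]
        exact pv_double_eq_single tt.length (line_n + offs) (line_n + TL + offs) (p + offs)
          (p + TL + offs)
          (fun s => (s, line_n + TL + offs, 1))
          (fun s => (s, if p + 1 ≥ TL then pvHALT else p + 1 + offs, -1))
          (fun s => (s, p + TL + offs, 1))
          (fun s => (s, line_n + offs, -1))
          TS u hlen (by omega) (by omega) (by omega) (by omega)
          (by omega) (by omega) (by omega) (by omega) (by omega)
      · simp only [if_neg hcond]
        exact pv_double_eq_single tt.length (line_n + offs) (line_n + TL + offs) (p + offs)
          (p + TL + offs)
          (fun s => (s, line_n + TL + offs, 1))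
          (fun s => (s, line_n + 1 + offs, -1))
          (fun s => (s, p + TL + offs, 1))
          (fun s => (s, line_n + offs, -1))
          TS u hlen (by omega) (by omega) (by omega) (by omega)
          (by omega) (by omega) (by omega) (by omega) (by omega)
    · dsimp only
      exact (pv_foldl_len _ (fun a w => by simp [pv_length_setCell]) _ u).trans hlen
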